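-- pv_equiv track=rewrite | github.com/AdeptAIPro/kempian-backend- | app/utils/module_role_mapper.py | get_role_from_modules
-- ===== SOURCE A (Python) =====
-- MODULE_ROLE_MAPPING = {
--     'payroll': 'employee',  # Payroll access typically means employee role
--     'talent_matchmaker': 'recruiter',  # Talent matching is for recruiters
--     'jobseeker': 'job_seeker',  # Job seeker module for job seekers
--     'jobs': 'employer',  # Job posting module for employers
--     'recruiter': 'recruiter',  # Recruiter module
--     'employer': 'employer',  # Employer module
--     'employee': 'employee',  # Employee module
-- }
--
-- ROLE_PRIORITY = ['admin', 'owner', 'employer', 'recruiter', 'employee', 'job_seeker', 'subuser']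
--
-- def get_role_from_modules(module_names):
--     """
--     Determine user role based on assigned modules
--
--     Args:
--         module_names: List of module names the user has access to
--
--     Returns:
--         str: The role that should be assigned to the user
--     """
--     if not module_names:
--         return 'subuser'  # Default role if no modules assigned
--
--     # Get roles for each module
--     roles = []
--     for module in module_names:
--         role = MODULE_ROLE_MAPPING.get(module.lower())
--         if role:
--             roles.append(role)
--
--     if not roles:
--         return 'subuser'  # Default if no valid role mapping found
--
--     # If user has multiple roles, return the highest priority one
--     # Sort by priority (higher priority first)
--     roles_sorted = sorted(roles, key=lambda r: ROLE_PRIORITY.index(r) if r in ROLE_PRIORITY else len(ROLE_PRIORITY))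
--     return roles_sorted[0]
-- ===== SOURCE B (Python) =====
-- MODULE_ROLE_MAPPING = {
--     'payroll': 'employee',
--     'talent_matchmaker': 'recruiter',
--     'jobseeker': 'job_seeker',
--     'jobs': 'employer',
--     'recruiter': 'recruiter',
--     'employer': 'employer',
--     'employee': 'employee',
-- }
--
-- ROLE_PRIORITY = ['admin', 'owner', 'employer', 'recruiter', 'employee', 'job_seeker', 'subuser']
--
-- def get_role_from_modules(module_names):
--     """Determine user role based on assigned modules (priority-table scan)."""
--     mapped = set()
--     for module in module_names:
--         role = MODULE_ROLE_MAPPING.get(module.lower())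
--         if role:
--             mapped.add(role)
--     for role in ROLE_PRIORITY:
--         if role in mapped:
--             return role
--     return 'subuser'
-- ===== Notes on version B (the rewrite author's own statement) =====
-- stated objective: simpler
-- what changed: Replaces the collect-roles-then-sort-by-priority-index step with a single scan of ROLE_PRIORITY that returns the first role mapped by any module (membership in a set built in one pass), removing the sort and both empty guards.
import Mathlib
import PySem

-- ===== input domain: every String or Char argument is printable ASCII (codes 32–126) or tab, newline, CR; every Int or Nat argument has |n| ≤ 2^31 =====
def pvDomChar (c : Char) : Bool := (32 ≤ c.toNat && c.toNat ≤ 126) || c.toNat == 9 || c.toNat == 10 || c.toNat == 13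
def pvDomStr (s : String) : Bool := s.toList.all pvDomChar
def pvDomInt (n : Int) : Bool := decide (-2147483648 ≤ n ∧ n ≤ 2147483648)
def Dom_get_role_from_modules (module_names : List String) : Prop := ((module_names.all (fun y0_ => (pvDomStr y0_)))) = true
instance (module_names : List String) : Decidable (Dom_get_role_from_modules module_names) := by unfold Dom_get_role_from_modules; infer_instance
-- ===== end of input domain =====

-- B replaces A's collect-then-sort with a scan of ROLE_PRIORITY over a set of mapped roles (simpler).

-- ===== PORT A =====
def moduleRoleMapping : PySem.Dict String String :=
  PySem.Dict.ofList [("payroll", "employee"), ("talent_matchmaker", "recruiter"),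
    ("jobseeker", "job_seeker"), ("jobs", "employer"), ("recruiter", "recruiter"),
    ("employer", "employer"), ("employee", "employee")]

def rolePriority : List String :=
  ["admin", "owner", "employer", "recruiter", "employee", "job_seeker", "subuser"]

-- the sort key: ROLE_PRIORITY.index(r) if r in ROLE_PRIORITY else len(ROLE_PRIORITY)
def roleKey (r : String) : Int :=
  if rolePriority.contains r then ((PySem.List.index? rolePriority r).getD 0 : Nat) else (rolePriority.length : Nat)

def get_role_from_modules (module_names : List String) : String :=
  if module_names = [] then "subuser"
  else
    let roles := module_names.foldl (fun acc m =>
      match moduleRoleMapping.get? (PySem.Str.lower m) with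
      | some role => if role ≠ "" then acc ++ [role] else acc
      | none => acc) []
    if roles = [] then "subuser"
    else
      let roles_sorted := PySem.List.sorted roles roleKey
      -- roles_sorted[0]: roles_sorted is provably nonempty here, so the default is never used
      (PySem.List.pyGet? roles_sorted 0).getD "subuser"

-- ===== PORT B =====
def get_role_from_modules_alt (module_names : List String) : String :=
  let mapped : PySem.Set String := module_names.foldl (fun s m =>
    match moduleRoleMapping.get? (PySem.Str.lower m) with
    | some role => if role ≠ "" then PySem.Set.add s role else s
    | none => s) PySem.Set.empty
  match rolePriority.find? (fun role => PySem.Set.contains mapped role) with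
  | some role => role
  | none => "subuser"

-- ===== PRECONDITION & SPEC =====
def Spec_get_role_from_modules (module_names : List String) (out : String) : Prop := out = get_role_from_modules_alt module_names
instance (module_names : List String) (out : String) : Decidable (Spec_get_role_from_modules module_names out) := by unfold Spec_get_role_from_modules; infer_instance

-- ===== CLAIM (what is proved, stated in full; the proofs are below) =====
def Claim_equal_get_role_from_modules : Prop := ∀ (module_names : List String), Dom_get_role_from_modules module_names → Spec_get_role_from_modules module_names (get_role_from_modules module_names)

-- ===== LEMMAS AND PROOFS =====

-- every value the mapping can return
lemma mapping_values {m r : String} (h : moduleRoleMapping.get? m = some r) :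
    r = "employee" ∨ r = "recruiter" ∨ r = "job_seeker" ∨ r = "employer" := by
  have e : moduleRoleMapping = PySem.Dict.mk [("payroll", "employee"), ("talent_matchmaker", "recruiter"),
    ("jobseeker", "job_seeker"), ("jobs", "employer"), ("recruiter", "recruiter"),
    ("employer", "employer"), ("employee", "employee")] := by decide
  rw [e] at h
  simp only [PySem.Dict.get?_mk_cons] at h
  repeat' split at h
  all_goals simp_all [PySem.Dict.get?]

-- membership in A's roles list
lemma mem_rolesA (mns : List String) (acc : List String) (r : String) :
    r ∈ mns.foldl (fun acc m =>
      match moduleRoleMapping.get? (PySem.Str.lower m) with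
      | some role => if role ≠ "" then acc ++ [role] else acc
      | none => acc) acc ↔
    r ∈ acc ∨ ∃ m ∈ mns, moduleRoleMapping.get? (PySem.Str.lower m) = some r ∧ r ≠ "" := by
  induction mns generalizing acc with
  | nil => simp
  | cons x xs ih =>
    rw [List.foldl_cons]
    cases hx : moduleRoleMapping.get? (PySem.Str.lower x) with
    | none =>
      simp only [ih]
      constructor
      · rintro (h | ⟨m, hm, hg, hr⟩)
        · exact Or.inl h
        · exact Or.inr ⟨m, List.mem_cons_of_mem _ hm, hg, hr⟩
      · rintro (h | ⟨m, hm, hg, hr⟩)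
        · exact Or.inl h
        · rcases List.mem_cons.1 hm with rfl | hm'
          · rw [hx] at hg; cases hg
          · exact Or.inr ⟨m, hm', hg, hr⟩
    | some role =>
      by_cases hr0 : role = ""
      · simp only [hr0, ne_eq, not_true_eq_false, if_false, ih]
        constructor
        · rintro (h | ⟨m, hm, hg, hr⟩)
          · exact Or.inl h
          · exact Or.inr ⟨m, List.mem_cons_of_mem _ hm, hg, hr⟩
        · rintro (h | ⟨m, hm, hg, hr⟩)
          · exact Or.inl h
          · rcases List.mem_cons.1 hm with rfl | hm'
            · rw [hx] at hg
              injection hg with hgr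
              subst hgr
              exact absurd hr0 hr
            · exact Or.inr ⟨m, hm', hg, hr⟩
      · simp only [ne_eq, hr0, not_false_iff, if_true, ih]
        constructor
        · rintro (h | ⟨m, hm, hg, hr⟩)
          · rcases List.mem_append.1 h with h' | h'
            · exact Or.inl h'
            · rcases List.mem_singleton.1 h' with rfl
              exact Or.inr ⟨x, List.mem_cons_self .., hx, hr0⟩
          · exact Or.inr ⟨m, List.mem_cons_of_mem _ hm, hg, hr⟩
        · rintro (h | ⟨m, hm, hg, hr⟩)
          · exact Or.inl (List.mem_append_left _ h)
          · rcases List.mem_cons.1 hm with rfl | hm'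
            · rw [hx] at hg
              cases hg
              exact Or.inl (List.mem_append_right _ (List.mem_singleton.2 rfl))
            · exact Or.inr ⟨m, hm', hg, hr⟩

-- membership in B's set
lemma mem_mappedB (mns : List String) (s : PySem.Set String) (r : String) :
    r ∈ mns.foldl (fun s m =>
      match moduleRoleMapping.get? (PySem.Str.lower m) with
      | some role => if role ≠ "" then PySem.Set.add s role else s
      | none => s) s ↔
    r ∈ s ∨ ∃ m ∈ mns, moduleRoleMapping.get? (PySem.Str.lower m) = some r ∧ r ≠ "" := by
  induction mns generalizing s with
  | nil => simp
  | cons x xs ih =>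
    rw [List.foldl_cons]
    cases hx : moduleRoleMapping.get? (PySem.Str.lower x) with
    | none =>
      simp only [ih]
      constructor
      · rintro (h | ⟨m, hm, hg, hr⟩)
        · exact Or.inl h
        · exact Or.inr ⟨m, List.mem_cons_of_mem _ hm, hg, hr⟩
      · rintro (h | ⟨m, hm, hg, hr⟩)
        · exact Or.inl h
        · rcases List.mem_cons.1 hm with rfl | hm'
          · rw [hx] at hg; cases hg
          · exact Or.inr ⟨m, hm', hg, hr⟩
    | some role =>
      by_cases hr0 : role = ""
      · simp only [hr0, ne_eq, not_true_eq_false, if_false, ih]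
        constructor
        · rintro (h | ⟨m, hm, hg, hr⟩)
          · exact Or.inl h
          · exact Or.inr ⟨m, List.mem_cons_of_mem _ hm, hg, hr⟩
        · rintro (h | ⟨m, hm, hg, hr⟩)
          · exact Or.inl h
          · rcases List.mem_cons.1 hm with rfl | hm'
            · rw [hx] at hg
              injection hg with hgr
              subst hgr
              exact absurd hr0 hr
            · exact Or.inr ⟨m, hm', hg, hr⟩
      · simp only [ne_eq, hr0, not_false_iff, if_true, ih]
        constructor
        · rintro (h | ⟨m, hm, hg, hr⟩)
          · rcases (PySem.Set.mem_add s role r).1 h with h' | h'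
            · exact Or.inl h'
            · subst h'
              exact Or.inr ⟨x, List.mem_cons_self .., hx, hr0⟩
          · exact Or.inr ⟨m, List.mem_cons_of_mem _ hm, hg, hr⟩
        · rintro (h | ⟨m, hm, hg, hr⟩)
          · exact Or.inl ((PySem.Set.mem_add s role r).2 (Or.inl h))
          · rcases List.mem_cons.1 hm with rfl | hm'
            · rw [hx] at hg
              cases hg
              exact Or.inl ((PySem.Set.mem_add s r r).2 (Or.inr rfl))
            · exact Or.inr ⟨m, hm', hg, hr⟩

lemma pyGet_head (a : String) (t : List String) :
    (PySem.List.pyGet? (a :: t) 0).getD "subuser" = a := by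
  simp [PySem.List.pyGet?, PySem.List.pyIdx?]

-- ===== VERDICT (by name: the statement is the Claim_ definition above) =====
theorem get_role_from_modules_spec : Claim_equal_get_role_from_modules := by
  intro mns _
  unfold Spec_get_role_from_modules get_role_from_modules get_role_from_modules_alt
  by_cases hnil : mns = []
  · subst hnil; decide
  · rw [if_neg hnil]
    simp only []
    set roles := mns.foldl (fun acc m =>
        match moduleRoleMapping.get? (PySem.Str.lower m) with
        | some role => if role ≠ "" then acc ++ [role] else acc
        | none => acc) [] with hroles
    set mapped := mns.foldl (fun s m =>
        match moduleRoleMapping.get? (PySem.Str.lower m) with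
        | some role => if role ≠ "" then PySem.Set.add s role else s
        | none => s) PySem.Set.empty with hmapped
    have hmemiff : ∀ r, r ∈ roles ↔ r ∈ mapped := by
      intro r
      rw [hroles, hmapped, mem_rolesA, mem_mappedB]
      simp [PySem.Set.empty]
    have hcon : ∀ r, PySem.Set.contains mapped r = true ↔ r ∈ roles := by
      intro r; rw [PySem.Set.contains_iff, ← hmemiff]
    have hsub : ∀ r ∈ roles, r = "employee" ∨ r = "recruiter" ∨ r = "job_seeker" ∨ r = "employer" := by
      intro r hr
      rw [hroles, mem_rolesA] at hr
      rcases hr with h | ⟨_, _, hg, _⟩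
      · simp at h
      · exact mapping_values hg
    by_cases hre : roles = []
    · rw [if_pos hre]
      have hfind : rolePriority.find? (fun role => PySem.Set.contains mapped role) = none := by
        rw [List.find?_eq_none]
        intro x _
        simp only [PySem.Set.contains_iff]
        intro hx
        rw [← hmemiff x, hre] at hx
        simp at hx
      rw [hfind]
    · rw [if_neg hre]
      obtain ⟨a, t, hsort⟩ : ∃ a t, PySem.List.sorted roles roleKey = a :: t := by
        rcases h : PySem.List.sorted roles roleKey with _ | ⟨a, t⟩
        · exact absurd ((PySem.List.sorted_eq_nil_iff _ _ _).1 h) hre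
        · exact ⟨a, t, rfl⟩
      have hamem : a ∈ roles := (PySem.List.mem_sorted _ _ _ _).1 (hsort ▸ List.mem_cons_self ..)
      have hmin : ∀ y ∈ roles, roleKey a ≤ roleKey y := PySem.List.key_head_sorted_le roles roleKey hsort
      have haval := hsub a hamem
      rw [hsort, pyGet_head]
      have hA : ∀ r, PySem.Set.contains mapped r = false ↔ r ∉ roles := by
        intro r
        rw [← Bool.not_eq_true, hcon]
      have hno : ∀ r : String, r ≠ "employee" → r ≠ "recruiter" → r ≠ "job_seeker" → r ≠ "employer" →
          PySem.Set.contains mapped r = false := by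
        intro r h1 h2 h3 h4
        rw [hA]
        intro hmem
        rcases hsub r hmem with h | h | h | h <;> simp_all
      have hkey : ∀ r ∈ roles, roleKey r =
          (if r = "employer" then 2 else if r = "recruiter" then 3 else if r = "employee" then 4 else 5) := by
        intro r hr
        rcases hsub r hr with rfl | rfl | rfl | rfl <;> decide
      by_cases h2 : "employer" ∈ roles
      · have ha : a = "employer" := by
          have hle := hmin _ h2
          rw [hkey a hamem, hkey _ h2] at hle
          rcases haval with rfl | rfl | rfl | rfl <;> simp_all
        have hfind : rolePriority.find? (fun role => PySem.Set.contains mapped role) = some "employer" := by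
          simp only [rolePriority, List.find?,
            hno "admin" (by decide) (by decide) (by decide) (by decide),
            hno "owner" (by decide) (by decide) (by decide) (by decide),
            (hcon "employer").2 h2]
        rw [hfind, ha]
      · by_cases h3 : "recruiter" ∈ roles
        · have ha : a = "recruiter" := by
            have hle := hmin _ h3
            rw [hkey a hamem, hkey _ h3] at hle
            rcases haval with rfl | rfl | rfl | rfl <;> simp_all
          have hfind : rolePriority.find? (fun role => PySem.Set.contains mapped role) = some "recruiter" := by
            simp only [rolePriority, List.find?,
              hno "admin" (by decide) (by decide) (by decide) (by decide),
              hno "owner" (by decide) (by decide) (by decide) (by decide),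
              (hA "employer").2 h2,
              (hcon "recruiter").2 h3]
          rw [hfind, ha]
        · by_cases h4 : "employee" ∈ roles
          · have ha : a = "employee" := by
              have hle := hmin _ h4
              rw [hkey a hamem, hkey _ h4] at hle
              rcases haval with rfl | rfl | rfl | rfl <;> simp_all
            have hfind : rolePriority.find? (fun role => PySem.Set.contains mapped role) = some "employee" := by
              simp only [rolePriority, List.find?,
                hno "admin" (by decide) (by decide) (by decide) (by decide),
                hno "owner" (by decide) (by decide) (by decide) (by decide),
                (hA "employer").2 h2, (hA "recruiter").2 h3,
                (hcon "employee").2 h4]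
            rw [hfind, ha]
          · have h5 : "job_seeker" ∈ roles := by
              rcases haval with rfl | rfl | rfl | rfl <;> simp_all
            have ha : a = "job_seeker" := by
              rcases haval with rfl | rfl | rfl | rfl <;> simp_all
            have hfind : rolePriority.find? (fun role => PySem.Set.contains mapped role) = some "job_seeker" := by
              simp only [rolePriority, List.find?,
                hno "admin" (by decide) (by decide) (by decide) (by decide),
                hno "owner" (by decide) (by decide) (by decide) (by decide),
                (hA "employer").2 h2, (hA "recruiter").2 h3, (hA "employee").2 h4,
                (hcon "job_seeker").2 h5]
            rw [hfind, ha]
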